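-- pv_equiv track=rewrite | github.com/adamallaf/m_tools | hexdump/m_hexdump.py | createHexData
-- ===== SOURCE A (Python) =====
-- def createHexData(data):
--     hex_data = ""
--     i = 1
--     for b in data:
--         hex_data += "{:02x}".format(b)
--         if i % 4 == 0 and i < 16:
--             hex_data += " "
--         i += 1
--     return hex_data
-- ===== SOURCE B (Python) =====
-- def createHexData(data):
--     def hx(chunk):
--         return "".join("{:02x}".format(b) for b in chunk)
--     out = hx(data[0:4])
--     if len(data) >= 4:
--         out += " "
--     out += hx(data[4:8])
--     if len(data) >= 8:
--         out += " "
--     out += hx(data[8:12])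
--     if len(data) >= 12:
--         out += " "
--     return out + hx(data[12:])
-- ===== Notes on version B (the rewrite author's own statement) =====
-- stated objective: alternative
-- what changed: Replaces the 1-based running counter with `i % 4 == 0 and i < 16` spacing tests by slicing the input into the four 4-byte chunks data[0:4], data[4:8], data[8:12], data[12:], joining each chunk's hex and inserting a space after a chunk exactly when the data reaches that boundary (len >= 4/8/12).
import Mathlib
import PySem

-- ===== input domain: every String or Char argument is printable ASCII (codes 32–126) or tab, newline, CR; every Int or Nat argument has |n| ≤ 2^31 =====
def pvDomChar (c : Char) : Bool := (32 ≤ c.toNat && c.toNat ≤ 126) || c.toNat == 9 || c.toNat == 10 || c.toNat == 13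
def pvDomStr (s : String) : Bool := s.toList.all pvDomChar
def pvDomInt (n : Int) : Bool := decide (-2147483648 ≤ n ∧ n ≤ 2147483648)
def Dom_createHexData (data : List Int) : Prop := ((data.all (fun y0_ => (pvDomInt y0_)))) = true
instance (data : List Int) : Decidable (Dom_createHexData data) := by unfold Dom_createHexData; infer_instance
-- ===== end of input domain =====

-- B formats each byte with 4-byte slices instead of A's running counter; same cost, different decomposition.

-- ===== PORT A =====
-- "{:02x}".format(b): lowercase hex, zero-padded to total width 2 (sign included);
-- a negative value prints '-' followed by at least one digit, so it is never padded.
def pvFmt02x (b : Int) : String :=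
  if b < 0 then "-" ++ String.mk (Nat.toDigits 16 b.natAbs)
  else if b < 16 then "0" ++ String.mk (Nat.toDigits 16 b.toNat)
  else String.mk (Nat.toDigits 16 b.toNat)

def createHexData (data : List Int) : String :=
  (data.foldl (fun (st : String × Int) b =>
      let h := st.1 ++ pvFmt02x b
      let h := if PySem.Int.mod st.2 4 = 0 ∧ st.2 < 16 then h ++ " " else h
      (h, st.2 + 1)) ("", 1)).1

-- ===== PORT B =====
-- hx(chunk) = ''.join('{:02x}'.format(b) for b in chunk), transcribed structurally
def pvHx : List Int → String
  | [] => ""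
  | b :: t => pvFmt02x b ++ pvHx t

def createHexData_alt (data : List Int) : String :=
  let out := pvHx (PySem.List.slice data (some 0) (some 4))
  let out := if 4 ≤ data.length then out ++ " " else out
  let out := out ++ pvHx (PySem.List.slice data (some 4) (some 8))
  let out := if 8 ≤ data.length then out ++ " " else out
  let out := out ++ pvHx (PySem.List.slice data (some 8) (some 12))
  let out := if 12 ≤ data.length then out ++ " " else out
  out ++ pvHx (PySem.List.slice data (some 12) none)

-- ===== PRECONDITION & SPEC =====
def Spec_createHexData (data : List Int) (out : String) : Prop := out = createHexData_alt data
instance (data : List Int) (out : String) : Decidable (Spec_createHexData data out) := by unfold Spec_createHexData; infer_instance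

-- ===== CLAIM (what is proved, stated in full; the proofs are below) =====
def Claim_equal_createHexData : Prop := ∀ (data : List Int), Dom_createHexData data → Spec_createHexData data (createHexData data)

-- ===== LEMMAS AND PROOFS =====

-- A's loop body with the string accumulator factored out
def gA : Int → List Int → String
  | _, [] => ""
  | i, b :: t =>
      (pvFmt02x b ++ (if PySem.Int.mod i 4 = 0 ∧ i < 16 then " " else "")) ++ gA (i + 1) t

theorem foldA_eq (data : List Int) : ∀ (s : String) (i : Int),
    (data.foldl (fun (st : String × Int) b =>
      let h := st.1 ++ pvFmt02x b
      let h := if PySem.Int.mod st.2 4 = 0 ∧ st.2 < 16 then h ++ " " else h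
      (h, st.2 + 1)) (s, i)).1 = s ++ gA i data := by
  induction data with
  | nil => intro s i; simp [gA]
  | cons b t ih =>
      intro s i
      rw [List.foldl_cons]
      refine (ih _ (i + 1)).trans ?_
      simp only [gA]
      split_ifs with hc <;> simp [String.append_assoc]

theorem gA_ge16 (data : List Int) : ∀ (i : Int), 16 ≤ i → gA i data = pvHx data := by
  induction data with
  | nil => intro i _; simp [gA, pvHx]
  | cons b t ih =>
      intro i hi
      have hnc : ¬ (PySem.Int.mod i 4 = 0 ∧ i < 16) := fun h => absurd h.2 (by omega)
      simp only [gA, pvHx]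
      rw [if_neg hnc, ih (i + 1) (by omega)]
      simp

theorem gA16 (t : List Int) : gA 16 t = pvHx t := gA_ge16 t 16 (by norm_num)

theorem B_eq_gA (data : List Int) : createHexData_alt data = gA 1 data := by
  rcases data with _ | ⟨b1, data⟩
  · simp [createHexData_alt, gA, pvHx, gA16, PySem.List.slice_toNat, PySem.List.slice_from, PySem.Int.mod, String.append_assoc, List.take_succ_cons, List.drop_succ_cons]
  rcases data with _ | ⟨b2, data⟩
  · simp [createHexData_alt, gA, pvHx, gA16, PySem.List.slice_toNat, PySem.List.slice_from, PySem.Int.mod, String.append_assoc, List.take_succ_cons, List.drop_succ_cons]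
  rcases data with _ | ⟨b3, data⟩
  · simp [createHexData_alt, gA, pvHx, gA16, PySem.List.slice_toNat, PySem.List.slice_from, PySem.Int.mod, String.append_assoc, List.take_succ_cons, List.drop_succ_cons]
  rcases data with _ | ⟨b4, data⟩
  · simp [createHexData_alt, gA, pvHx, gA16, PySem.List.slice_toNat, PySem.List.slice_from, PySem.Int.mod, String.append_assoc, List.take_succ_cons, List.drop_succ_cons]
  rcases data with _ | ⟨b5, data⟩
  · simp [createHexData_alt, gA, pvHx, gA16, PySem.List.slice_toNat, PySem.List.slice_from, PySem.Int.mod, String.append_assoc, List.take_succ_cons, List.drop_succ_cons]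
  rcases data with _ | ⟨b6, data⟩
  · simp [createHexData_alt, gA, pvHx, gA16, PySem.List.slice_toNat, PySem.List.slice_from, PySem.Int.mod, String.append_assoc, List.take_succ_cons, List.drop_succ_cons]
  rcases data with _ | ⟨b7, data⟩
  · simp [createHexData_alt, gA, pvHx, gA16, PySem.List.slice_toNat, PySem.List.slice_from, PySem.Int.mod, String.append_assoc, List.take_succ_cons, List.drop_succ_cons]
  rcases data with _ | ⟨b8, data⟩
  · simp [createHexData_alt, gA, pvHx, gA16, PySem.List.slice_toNat, PySem.List.slice_from, PySem.Int.mod, String.append_assoc, List.take_succ_cons, List.drop_succ_cons]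
  rcases data with _ | ⟨b9, data⟩
  · simp [createHexData_alt, gA, pvHx, gA16, PySem.List.slice_toNat, PySem.List.slice_from, PySem.Int.mod, String.append_assoc, List.take_succ_cons, List.drop_succ_cons]
  rcases data with _ | ⟨b10, data⟩
  · simp [createHexData_alt, gA, pvHx, gA16, PySem.List.slice_toNat, PySem.List.slice_from, PySem.Int.mod, String.append_assoc, List.take_succ_cons, List.drop_succ_cons]
  rcases data with _ | ⟨b11, data⟩
  · simp [createHexData_alt, gA, pvHx, gA16, PySem.List.slice_toNat, PySem.List.slice_from, PySem.Int.mod, String.append_assoc, List.take_succ_cons, List.drop_succ_cons]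
  rcases data with _ | ⟨b12, data⟩
  · simp [createHexData_alt, gA, pvHx, gA16, PySem.List.slice_toNat, PySem.List.slice_from, PySem.Int.mod, String.append_assoc, List.take_succ_cons, List.drop_succ_cons]
  rcases data with _ | ⟨b13, data⟩
  · simp [createHexData_alt, gA, pvHx, gA16, PySem.List.slice_toNat, PySem.List.slice_from, PySem.Int.mod, String.append_assoc, List.take_succ_cons, List.drop_succ_cons]
  rcases data with _ | ⟨b14, data⟩
  · simp [createHexData_alt, gA, pvHx, gA16, PySem.List.slice_toNat, PySem.List.slice_from, PySem.Int.mod, String.append_assoc, List.take_succ_cons, List.drop_succ_cons]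
  rcases data with _ | ⟨b15, data⟩
  · simp [createHexData_alt, gA, pvHx, gA16, PySem.List.slice_toNat, PySem.List.slice_from, PySem.Int.mod, String.append_assoc, List.take_succ_cons, List.drop_succ_cons]
  -- data = b1 :: … :: b15 :: rest
  simp only [createHexData_alt]
  rw [if_pos (by simp only [List.length_cons]; omega),
      if_pos (by simp only [List.length_cons]; omega),
      if_pos (by simp only [List.length_cons]; omega)]
  simp [gA, pvHx, gA16, PySem.List.slice_toNat, PySem.List.slice_from, PySem.Int.mod, String.append_assoc, List.take_succ_cons, List.drop_succ_cons]

-- ===== VERDICT (by name: the statement is the Claim_ definition above) =====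
theorem createHexData_spec : Claim_equal_createHexData := by
  intro data _
  show createHexData data = createHexData_alt data
  unfold createHexData
  rw [foldA_eq, B_eq_gA]
  simp
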